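-- pv_equiv track=rewrite | github.com/jxu/op-reject-rule | src/148.py | assign_digits
-- ===== SOURCE A (Python) =====
-- def assign_digits(n, free_assign):
--     if len(n) == 0:
--         return 1
--
--     total_count = 0
--     if free_assign:
--         total_count += (1+2+3+4+5+6+7)*assign_digits(n[1:], True)
--
--     else:
--         for d in range(n[0]):
--             total_count += (d+1)*assign_digits(n[1:], True)
--
--         total_count += (n[0]+1)*assign_digits(n[1:], False)
--
--     return total_count
-- ===== SOURCE B (Python) =====
-- def assign_digits(n, free_assign):
--     # Closed form 28**len(n) for the free branch; otherwise one right-to-left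
--     # pass whose triangular-number term d*(d+1)//2 replaces the inner loop
--     # and the double recursion of the original.
--     if free_assign:
--         return 28 ** len(n)
--     res = 1
--     p = 1  # 28 ** (number of positions already processed)
--     for d in reversed(n):
--         t = d * (d + 1) // 2 if d > 0 else 0
--         res = t * p + (d + 1) * res
--         p *= 28
--     return res
-- ===== Notes on version B (the rewrite author's own statement) =====
-- stated objective: alternative
-- what changed: Replaces the branching recursion (with an inner loop spawning a recursive call per digit value) by a closed form 28**len(n) for the free branch and a single right-to-left pass using the triangular-number sum d(d+1)/2 for the constrained branch.
import Mathlib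
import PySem

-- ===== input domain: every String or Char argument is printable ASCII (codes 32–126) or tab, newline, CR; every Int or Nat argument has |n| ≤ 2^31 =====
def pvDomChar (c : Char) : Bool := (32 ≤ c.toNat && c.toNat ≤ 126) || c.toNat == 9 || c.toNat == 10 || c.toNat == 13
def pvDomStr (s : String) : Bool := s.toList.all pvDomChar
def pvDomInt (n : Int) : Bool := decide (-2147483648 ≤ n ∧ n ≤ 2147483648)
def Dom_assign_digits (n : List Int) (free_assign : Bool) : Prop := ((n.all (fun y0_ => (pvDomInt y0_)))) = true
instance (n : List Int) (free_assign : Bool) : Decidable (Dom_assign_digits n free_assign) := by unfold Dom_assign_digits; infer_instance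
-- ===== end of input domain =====

-- ===== PORT A =====
-- B replaces the double recursion by a closed form 28^len for the free branch and
-- one right-to-left pass with triangular-number sums for the constrained branch (objective: alternative).
def assign_digits : List Int → Bool → Int
  | [], _ => 1
  | d0 :: rest, free_assign =>
    if free_assign then
      0 + (1+2+3+4+5+6+7) * assign_digits rest true
    else
      let total := (PySem.List.pyRange 0 d0 1).foldl
        (fun acc d => acc + (d + 1) * assign_digits rest true) 0
      total + (d0 + 1) * assign_digits rest false

-- ===== PORT B =====
def assign_digits_alt (n : List Int) (free_assign : Bool) : Int :=
  if free_assign then 28 ^ n.length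
  else
    (n.foldr
      (fun d rp =>
        let t : Int := if d > 0 then PySem.Int.floordiv (d * (d + 1)) 2 else 0
        (t * rp.2 + (d + 1) * rp.1, rp.2 * 28))
      ((1 : Int), (1 : Int))).1

-- ===== PRECONDITION & SPEC =====
def Spec_assign_digits (n : List Int) (free_assign : Bool) (out : Int) : Prop := out = assign_digits_alt n free_assign
instance (n : List Int) (free_assign : Bool) (out : Int) : Decidable (Spec_assign_digits n free_assign out) := by unfold Spec_assign_digits; infer_instance

-- ===== CLAIM (what is proved, stated in full; the proofs are below) =====
def Claim_equal_assign_digits : Prop := ∀ (n : List Int) (free_assign : Bool), Dom_assign_digits n free_assign → Spec_assign_digits n free_assign (assign_digits n free_assign)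

-- ===== LEMMAS AND PROOFS =====

-- ===== VERDICT (by name: the statement is the Claim_ definition above) =====
theorem free_pow (n : List Int) : assign_digits n true = 28 ^ n.length := by
  induction n with
  | nil => simp [assign_digits]
  | cons d rest ih => simp [assign_digits, ih, pow_succ]; ring

theorem tri_aux (c : Int) (m : Nat) :
    2 * (PySem.List.pyRange 0 (m : Int) 1).foldl (fun acc i => acc + (i + 1) * c) 0
      = (m : Int) * ((m : Int) + 1) * c := by
  induction m with
  | zero => simp [PySem.List.pyRange_one_eq_nil]
  | succ k ih =>
    have h : ((k + 1 : Nat) : Int) = (k : Int) + 1 := by push_cast; ring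
    rw [h, PySem.List.pyRange_one_succ_right (by positivity), List.foldl_append]
    simp only [List.foldl_cons, List.foldl_nil]
    rw [mul_add 2, ih]
    ring

theorem tri_sum (c : Int) (d : Int) :
    (PySem.List.pyRange 0 d 1).foldl (fun acc i => acc + (i + 1) * c) 0
      = (if d > 0 then PySem.Int.floordiv (d * (d + 1)) 2 else 0) * c := by
  by_cases hd : d > 0
  · rw [if_pos hd]
    have hm : d = ((d.toNat : Nat) : Int) := (Int.toNat_of_nonneg (le_of_lt hd)).symm
    have h2 : 2 * (PySem.Int.floordiv (d * (d + 1)) 2 * c)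
        = 2 * ((PySem.List.pyRange 0 d 1).foldl (fun acc i => acc + (i + 1) * c) 0) := by
      rw [PySem.Int.floordiv_eq_ediv_of_pos (by norm_num)]
      obtain ⟨e, he⟩ := Int.even_mul_succ_self d
      have hdiv : 2 * (d * (d + 1) / 2) = d * (d + 1) := by omega
      rw [hm, tri_aux c d.toNat, ← hm, ← mul_assoc, hdiv]
    omega
  · rw [if_neg hd, PySem.List.pyRange_one_eq_nil (by omega)]
    simp

theorem foldr_pair (n : List Int) :
    n.foldr
      (fun d rp =>
        let t : Int := if d > 0 then PySem.Int.floordiv (d * (d + 1)) 2 else 0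
        (t * rp.2 + (d + 1) * rp.1, rp.2 * 28))
      ((1 : Int), (1 : Int))
      = (assign_digits n false, 28 ^ n.length) := by
  induction n with
  | nil => simp [assign_digits]
  | cons d rest ih =>
    simp only [List.foldr_cons, ih, assign_digits, free_pow, tri_sum]
    constructor <;> ring_nf

theorem assign_digits_spec : Claim_equal_assign_digits := by
  intro n fa _
  unfold Spec_assign_digits assign_digits_alt
  cases fa with
  | true => simp [free_pow]
  | false =>
    rw [if_neg (by simp), foldr_pair]
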